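-- pv_equiv track=rewrite | github.com/pypi-data/pypi-mirror-69 | packages/comet-ml/comet_ml-3.1.8.tar.gz/comet_ml-3.1.8/comet_ml/env_logging.py | get_env_variables
-- ===== SOURCE A (Python) =====
-- def get_env_variables(blacklist, os_environ):
--     # type: (List[str], Dict[str, str]) -> Dict[str, str]
--
--     lowercase_blacklist = [pattern.lower() for pattern in blacklist]
--
--     def filter_env_variable(env_variable_name):
--         # type: (str) -> bool
--         """ Filter environment variable names containing at least one of the blacklist pattern
--         """
--         lowercase_env_variable_name = env_variable_name.lower()
--         for pattern in lowercase_blacklist: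
--             if pattern in lowercase_env_variable_name:
--                 return False
--
--         return True
--
--     return {key: value for key, value in os_environ.items() if filter_env_variable(key)}
-- ===== SOURCE B (Python) =====
-- def get_env_variables(blacklist, os_environ):
--     # Pattern-major filtering: lowercase every key once, then shrink the item
--     # list by one pass per blacklist pattern (order of survivors is preserved).
--     items = [(key.lower(), key, value) for key, value in os_environ.items()]
--     for pattern in blacklist:
--         p = pattern.lower()
--         items = [t for t in items if p not in t[0]]
--     return {key: value for _, key, value in items}
-- ===== Notes on version B (the rewrite author's own statement) =====
-- stated objective: alternative
-- what changed: B filters pattern-major (one filtering pass over the item list per blacklist pattern, with each key lowercased exactly once up front) instead of A's key-major scan over all patterns per key.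
import Mathlib
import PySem

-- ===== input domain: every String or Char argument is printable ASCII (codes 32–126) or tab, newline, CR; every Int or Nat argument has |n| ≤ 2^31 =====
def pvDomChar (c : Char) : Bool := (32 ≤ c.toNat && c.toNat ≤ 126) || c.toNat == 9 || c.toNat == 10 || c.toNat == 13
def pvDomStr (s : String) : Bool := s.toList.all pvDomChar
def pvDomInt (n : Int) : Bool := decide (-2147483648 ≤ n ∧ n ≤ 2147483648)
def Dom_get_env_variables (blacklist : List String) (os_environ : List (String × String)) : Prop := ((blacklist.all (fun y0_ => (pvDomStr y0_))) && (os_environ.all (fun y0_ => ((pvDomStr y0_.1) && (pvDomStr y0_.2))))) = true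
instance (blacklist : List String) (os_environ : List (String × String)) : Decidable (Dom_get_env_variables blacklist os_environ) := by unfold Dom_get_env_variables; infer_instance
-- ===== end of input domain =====

-- B filters pattern-major (one filtering pass per blacklist pattern, each key lowercased once) instead of A's key-major scan over all patterns per key; return value only; both exact on Dom.


-- ===== PORT A =====
-- the inner 'for pattern in lowercase_blacklist: if pattern in name: return False' loop
def filterEnvVariable (lowercaseBlacklist : List String) (lowercaseName : String) : Bool :=
  match lowercaseBlacklist with
  | [] => true
  | pattern :: rest =>
    if PySem.Str.isIn pattern lowercaseName then false
    else filterEnvVariable rest lowercaseName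

def get_env_variables (blacklist : List String) (os_environ : List (String × String)) : List (String × String) :=
  let lowercaseBlacklist := blacklist.map PySem.Str.lower
  os_environ.filter (fun kv => filterEnvVariable lowercaseBlacklist (PySem.Str.lower kv.1))

-- ===== PORT B =====
def get_env_variables_alt (blacklist : List String) (os_environ : List (String × String)) : List (String × String) :=
  let items := os_environ.map (fun kv => (PySem.Str.lower kv.1, kv.1, kv.2))
  let items := blacklist.foldl
    (fun acc pattern =>
      let p := PySem.Str.lower pattern
      acc.filter (fun t => !(PySem.Str.isIn p t.1))) items
  items.map (fun t => (t.2.1, t.2.2))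

-- ===== PRECONDITION & SPEC =====
def Spec_get_env_variables (blacklist : List String) (os_environ : List (String × String)) (out : List (String × String)) : Prop := out = get_env_variables_alt blacklist os_environ
instance (blacklist : List String) (os_environ : List (String × String)) (out : List (String × String)) : Decidable (Spec_get_env_variables blacklist os_environ out) := by unfold Spec_get_env_variables; infer_instance

-- ===== CLAIM (what is proved, stated in full; the proofs are below) =====
def Claim_equal_get_env_variables : Prop := ∀ (blacklist : List String) (os_environ : List (String × String)), Dom_get_env_variables blacklist os_environ → Spec_get_env_variables blacklist os_environ (get_env_variables blacklist os_environ)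

-- ===== LEMMAS AND PROOFS =====

-- repeated filtering (one pass per pattern) equals one filtering pass by the conjunction
theorem foldl_filter_eq_filter_all {α β : Type} (f : β → α → Bool) :
    ∀ (bl : List β) (acc : List α),
      bl.foldl (fun acc p => acc.filter (fun t => f p t)) acc
        = acc.filter (fun t => bl.all (fun p => f p t)) := by
  intro bl
  induction bl with
  | nil => intro acc; simp
  | cons p rest ih =>
    intro acc
    simp only [List.foldl_cons, ih, List.filter_filter, List.all_cons]
    congr 1
    funext t
    exact Bool.and_comm _ _

-- A's inner loop is the all-quantifier over the lowered blacklist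
theorem filterEnvVariable_eq_all (lb : List String) (ln : String) :
    filterEnvVariable lb ln = lb.all (fun p => !(PySem.Str.isIn p ln)) := by
  induction lb with
  | nil => rfl
  | cons p rest ih =>
    simp only [filterEnvVariable, List.all_cons, ih]
    by_cases h : PySem.Str.isIn p ln <;> simp

theorem get_env_variables_spec : Claim_equal_get_env_variables := by
  intro blacklist os_environ _
  show os_environ.filter
        (fun kv => filterEnvVariable (blacklist.map PySem.Str.lower) (PySem.Str.lower kv.1))
      = (blacklist.foldl
          (fun acc pattern => acc.filter (fun t => !(PySem.Str.isIn (PySem.Str.lower pattern) t.1)))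
          (os_environ.map (fun kv => (PySem.Str.lower kv.1, kv.1, kv.2)))).map
          (fun t => (t.2.1, t.2.2))
  rw [foldl_filter_eq_filter_all (fun (p : String) (t : String × String × String) => !(PySem.Str.isIn (PySem.Str.lower p) t.1)) blacklist]
  rw [List.filter_map, List.map_map]
  simp only [Function.comp_def, filterEnvVariable_eq_all, List.all_map]
  simp
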